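-- pv_equiv track=rewrite | github.com/Victor-Liang-ChE/website | pages/JPlyrics.py | merge_adjacent_duplicates
-- ===== SOURCE A (Python) =====
-- def merge_adjacent_duplicates(lines):
--     if not lines:
--         return []
--     merged = []
--     count = 1
--     prev_line = lines[0]
--     for i in range(1, len(lines)):
--         if lines[i] == prev_line:
--             count += 1
--         else:
--             merged.append(f"{prev_line} x{count}" if count > 1 else prev_line)
--             prev_line = lines[i]
--             count = 1
--     merged.append(f"{prev_line} x{count}" if count > 1 else prev_line)
--     return merged
-- ===== SOURCE B (Python) =====
-- def merge_adjacent_duplicates(lines):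
--     result = []
--     i = 0
--     n = len(lines)
--     while i < n:
--         j = i + 1
--         while j < n and lines[j] == lines[i]:
--             j += 1
--         count = j - i
--         result.append(f"{lines[i]} x{count}" if count > 1 else lines[i])
--         i = j
--     return result
-- ===== Notes on version B (the rewrite author's own statement) =====
-- stated objective: alternative
-- what changed: Replaces the prev_line/count state machine (with its special-cased empty input and trailing flush) by a run-scanning two-pointer loop that finds each maximal run of equal adjacent lines and emits its collapsed entry directly; no accumulator state survives across runs and the empty case falls out naturally.
import Mathlib
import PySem

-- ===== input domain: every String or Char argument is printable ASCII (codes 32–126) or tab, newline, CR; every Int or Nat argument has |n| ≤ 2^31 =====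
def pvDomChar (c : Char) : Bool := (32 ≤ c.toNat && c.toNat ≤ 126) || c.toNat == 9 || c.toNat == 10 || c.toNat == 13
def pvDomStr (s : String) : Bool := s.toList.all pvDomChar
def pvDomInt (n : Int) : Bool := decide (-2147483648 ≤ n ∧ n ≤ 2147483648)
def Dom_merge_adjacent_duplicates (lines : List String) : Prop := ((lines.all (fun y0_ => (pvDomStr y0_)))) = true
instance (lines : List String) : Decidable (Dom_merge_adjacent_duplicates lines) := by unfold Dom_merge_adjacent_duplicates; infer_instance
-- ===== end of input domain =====

-- B replaces A's prev_line/count state machine (special-cased empty input, trailing flush)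
-- by a run-scanning loop that emits each maximal run's collapsed entry directly (alternative decomposition, same cost).

-- ===== PORT A =====
-- f"{prev_line} x{count}" if count > 1 else prev_line
def pvFmtA (prev : String) (count : Int) : String :=
  if count > 1 then prev ++ " x" ++ PySem.Int.toStr count else prev

-- the for-loop over range(1, len(lines)) reads lines[1:], i.e. the tail; state = (merged, count, prev_line)
def merge_adjacent_duplicates (lines : List String) : List String :=
  match lines with
  | [] => []
  | l0 :: rest =>
    let s := rest.foldl
      (fun (st : List String × Int × String) li =>
        if li == st.2.2 then (st.1, st.2.1 + 1, st.2.2)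
        else (st.1 ++ [pvFmtA st.2.2 st.2.1], 1, li))
      ([], 1, l0)
    s.1 ++ [pvFmtA s.2.2 s.2.1]

-- ===== PORT B =====
def pvFmtB (line : String) (count : Int) : String :=
  if count > 1 then line ++ " x" ++ PySem.Int.toStr count else line

-- inner while loop: advance j past the run of lines equal to lines[i]; count = j - i;
-- outer while loop: structural recursion on the remaining suffix
def merge_adjacent_duplicates_alt (lines : List String) : List String :=
  match lines with
  | [] => []
  | l :: rest =>
    pvFmtB l (1 + (rest.takeWhile (· == l)).length) ::
      merge_adjacent_duplicates_alt (rest.dropWhile (· == l))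
termination_by lines.length
decreasing_by
  simp only [List.length_cons]
  exact Nat.lt_succ_of_le (List.length_dropWhile_le _ _)

-- ===== PRECONDITION & SPEC =====
def Spec_merge_adjacent_duplicates (lines : List String) (out : List String) : Prop := out = merge_adjacent_duplicates_alt lines
instance (lines : List String) (out : List String) : Decidable (Spec_merge_adjacent_duplicates lines out) := by unfold Spec_merge_adjacent_duplicates; infer_instance

-- ===== CLAIM (what is proved, stated in full; the proofs are below) =====
def Claim_equal_merge_adjacent_duplicates : Prop := ∀ (lines : List String), Dom_merge_adjacent_duplicates lines → Spec_merge_adjacent_duplicates lines (merge_adjacent_duplicates lines)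

-- ===== LEMMAS AND PROOFS =====

-- A's loop body + trailing flush, as a function of the remaining input and the loop state
def pvAuxA (rest merged : List String) (count : Int) (prev : String) : List String :=
  let s := rest.foldl
    (fun (st : List String × Int × String) li =>
      if li == st.2.2 then (st.1, st.2.1 + 1, st.2.2)
      else (st.1 ++ [pvFmtA st.2.2 st.2.1], 1, li))
    (merged, count, prev)
  s.1 ++ [pvFmtA s.2.2 s.2.1]

-- Invariant: the state machine finishes the current run (count grows to count + run length),
-- flushes it, and then behaves exactly like B's run scanner on what is left.
theorem pvAuxA_eq (rest : List String) : ∀ (merged : List String) (count : Int) (prev : String),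
    pvAuxA rest merged count prev =
      merged ++ pvFmtB prev (count + (rest.takeWhile (· == prev)).length) ::
        merge_adjacent_duplicates_alt (rest.dropWhile (· == prev)) := by
  induction rest with
  | nil =>
    intro merged count prev
    simp [pvAuxA, merge_adjacent_duplicates_alt, pvFmtA, pvFmtB]
  | cons r rs ih =>
    intro merged count prev
    by_cases h : r = prev
    · subst h
      have : pvAuxA (r :: rs) merged count r = pvAuxA rs merged (count + 1) r := by
        simp [pvAuxA]
      rw [this, ih]
      simp [List.takeWhile, List.dropWhile]
      ring_nf
    · have : pvAuxA (r :: rs) merged count prev =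
          pvAuxA rs (merged ++ [pvFmtA prev count]) 1 r := by
        simp [pvAuxA, h]
      rw [this, ih]
      have halt : merge_adjacent_duplicates_alt (r :: rs) =
          pvFmtB r (1 + (rs.takeWhile (· == r)).length) ::
            merge_adjacent_duplicates_alt (rs.dropWhile (· == r)) := by
        rw [merge_adjacent_duplicates_alt]
      have hne : (r == prev) = false := by simp [h]
      simp [List.takeWhile, List.dropWhile, hne, halt, pvFmtA, pvFmtB]

-- ===== VERDICT (by name: the statement is the Claim_ definition above) =====
theorem merge_adjacent_duplicates_spec : Claim_equal_merge_adjacent_duplicates := by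
  intro lines _
  unfold Spec_merge_adjacent_duplicates
  match lines with
  | [] => simp [merge_adjacent_duplicates, merge_adjacent_duplicates_alt]
  | l :: rest =>
    have hA : merge_adjacent_duplicates (l :: rest) = pvAuxA rest [] 1 l := rfl
    rw [hA, pvAuxA_eq, merge_adjacent_duplicates_alt]
    simp
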